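-- pv_equiv track=rewrite | github.com/utmittal/wordle-strategies | util/indexers.py | get_letter_index
-- ===== SOURCE A (Python) =====
-- def get_letter_index(words: list[str] | set[str] | tuple[str]) -> dict[str, set[str]]:
--     # create index of words containing a specific letter
--     letter_index = {}
--     for word in words:
--         letters = list(word)
--         for l in letters:
--             if l in letter_index:
--                 letter_index[l].add(word)
--             else:
--                 letter_index[l] = {word}
--
--     return letter_index
-- ===== SOURCE B (Python) =====
-- def get_letter_index(words):
--     # Same index, built the other way round: first the distinct letters in
--     # first-occurrence order, then one filtering pass per letter.
--     letters = dict.fromkeys(l for word in words for l in word)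
--     return {l: {w for w in words if l in w} for l in letters}
-- ===== Notes on version B (the rewrite author's own statement) =====
-- stated objective: alternative
-- what changed: Replaces the single dict-accumulation pass (per-letter set inserted/updated while scanning each word) by a two-phase pipeline: first collect the distinct letters in first-occurrence order with dict.fromkeys over the flattened words, then build each letter's set by one filtering comprehension over the word list.
import Mathlib
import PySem

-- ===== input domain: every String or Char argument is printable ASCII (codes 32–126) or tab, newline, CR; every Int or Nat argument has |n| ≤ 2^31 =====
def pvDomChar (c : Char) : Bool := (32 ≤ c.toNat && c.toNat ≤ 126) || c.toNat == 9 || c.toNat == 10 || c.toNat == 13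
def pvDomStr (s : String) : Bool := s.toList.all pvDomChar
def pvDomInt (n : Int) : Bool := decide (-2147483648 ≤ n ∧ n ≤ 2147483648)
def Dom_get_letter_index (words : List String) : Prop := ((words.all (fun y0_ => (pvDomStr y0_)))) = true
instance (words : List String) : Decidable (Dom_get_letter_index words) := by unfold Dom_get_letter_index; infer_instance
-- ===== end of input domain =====

-- B replaces A's single dict-accumulation pass by a two-phase pipeline (distinct letters
-- first, then one filtering pass per letter): an alternative decomposition, not faster.

-- ===== PORT A =====
-- literal transliteration: dict keyed by the one-character string of each letter,
-- `letter_index[l].add(word)` = insert (overwrite in place) of the set with `word` added.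
def get_letter_index (words : List String) : List (String × List String) :=
  (words.foldl
    (fun letter_index word =>
      word.toList.foldl
        (fun letter_index l =>
          if letter_index.contains (String.ofList [l]) then
            letter_index.insert (String.ofList [l])
              (PySem.Set.add (letter_index.getD (String.ofList [l]) []) word)
          else
            letter_index.insert (String.ofList [l]) [word])
        letter_index)
    (PySem.Dict.empty : PySem.Dict String (List String))).items

-- ===== PORT B =====
-- transliteration of Source B; `l in w` for a one-character string l is exactly
-- membership of the character in w's characters.
def get_letter_index_alt (words : List String) : List (String × List String) :=
  (PySem.Set.ofList (words.flatMap (fun word => word.toList))).map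
    (fun l => (String.ofList [l],
      PySem.Set.ofList (words.filter (fun w => l ∈ w.toList))))

-- ===== PRECONDITION & SPEC =====
def Spec_get_letter_index (words : List String) (out : List (String × List String)) : Prop := out = get_letter_index_alt words
instance (words : List String) (out : List (String × List String)) : Decidable (Spec_get_letter_index words out) := by unfold Spec_get_letter_index; infer_instance

-- ===== CLAIM (what is proved, stated in full; the proofs are below) =====
def Claim_equal_get_letter_index : Prop := ∀ (words : List String), Dom_get_letter_index words → Spec_get_letter_index words (get_letter_index words)

-- ===== LEMMAS AND PROOFS =====

-- the dict key used by A for the letter c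
def pvKey (c : Char) : String := String.ofList [c]

theorem pvKey_injective : Function.Injective pvKey := by
  intro a b h
  have := congrArg String.toList h
  simp [pvKey] at this
  exact this

-- A's dict after some processing: keys are the letters seen so far (in order), value v c at each
def pvState (L : List Char) (v : Char → List String) : PySem.Dict String (List String) :=
  PySem.Dict.mk (L.map (fun c => (pvKey c, v c)))

-- A's inner loop body, named for the lemmas
def pvStep (w : String) (d : PySem.Dict String (List String)) (l : Char) : PySem.Dict String (List String) :=
  if d.contains (String.ofList [l]) then
    d.insert (String.ofList [l]) (PySem.Set.add (d.getD (String.ofList [l]) []) w)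
  else
    d.insert (String.ofList [l]) [w]

theorem pvState_contains (L : List Char) (v : Char → List String) (c : Char) :
    (pvState L v).contains (pvKey c) = decide (c ∈ L) := by
  rw [PySem.Dict.contains_eq_decide_mem_keys]
  simp [pvState, PySem.Dict.keys]
  constructor
  · rintro ⟨a, ha, h⟩; exact (pvKey_injective h) ▸ ha
  · intro h; exact ⟨c, h, rfl⟩


theorem pvState_keys_nodup (L : List Char) (v : Char → List String) (hL : L.Nodup) :
    (pvState L v).keys.Nodup := by
  simp [pvState, PySem.Dict.keys, List.map_map]
  exact hL.map (fun a b h => pvKey_injective (by simpa using h))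

theorem pvState_getD (L : List Char) (v : Char → List String) (hL : L.Nodup) (c : Char)
    (hc : c ∈ L) : (pvState L v).getD (pvKey c) [] = v c := by
  apply PySem.Dict.getD_of_mem_items
  · simp [pvState]
    exact ⟨c, hc, rfl, rfl⟩
  · exact pvState_keys_nodup L v hL

theorem pvStep_state (L : List Char) (v : Char → List String) (w : String) (c : Char)
    (hL : L.Nodup) (hv : ∀ c', c' ∉ L → v c' = []) :
    pvStep w (pvState L v) c
      = pvState (PySem.Set.add L c) (fun c' => if c' = c then PySem.Set.add (v c') w else v c') := by
  have hkey : (String.ofList [c] : String) = pvKey c := rfl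
  unfold pvStep
  rw [hkey, pvState_contains]
  by_cases hc : c ∈ L
  · rw [if_pos (by simpa using hc), pvState_getD L v hL c hc, PySem.Set.add_of_mem hc]
    apply PySem.Dict.ext
    rw [PySem.Dict.items_insert_of_contains _ _ (by rw [pvState_contains]; simpa using hc)]
    show (L.map (fun c' => (pvKey c', v c'))).map _ = L.map _
    rw [List.map_map]
    apply List.map_congr_left
    intro a _
    by_cases hac : a = c
    · subst hac
      simp
    · have : (pvKey a == pvKey c) = false := by
        simp only [beq_eq_false_iff_ne, ne_eq]
        exact fun h => hac (pvKey_injective h)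
      simp [hac]
      exact fun h => absurd (pvKey_injective h) hac
  · rw [if_neg (by simpa using hc), PySem.Set.add_of_not_mem hc]
    apply PySem.Dict.ext
    rw [PySem.Dict.items_insert_of_not_contains _ _ (by rw [pvState_contains]; simpa using hc)]
    show (L.map (fun c' => (pvKey c', v c'))) ++ [(pvKey c, [w])]
        = (L ++ [c]).map (fun c' => (pvKey c', if c' = c then PySem.Set.add (v c') w else v c'))
    rw [List.map_append]
    congr 1
    · apply List.map_congr_left
      intro a ha
      have hac : a ≠ c := fun h => hc (h ▸ ha)
      simp [hac]
    · simp [hv c hc, PySem.Set.add]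

theorem pvInner (w : String) (cs : List Char) :
    ∀ (L : List Char) (v : Char → List String), L.Nodup → (∀ c', c' ∉ L → v c' = []) →
    cs.foldl (pvStep w) (pvState L v)
      = pvState (PySem.Set.update L cs)
          (fun c => if c ∈ cs then PySem.Set.add (v c) w else v c) := by
  induction cs with
  | nil => intro L v hL hv; simp [PySem.Set.update]
  | cons c cs ih =>
    intro L v hL hv
    rw [List.foldl_cons, pvStep_state L v w c hL hv,
        ih (PySem.Set.add L c) _ (PySem.Set.nodup_add L c hL)
          (fun c' hc' => by
            rw [PySem.Set.mem_add] at hc'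
            push Not at hc'
            simp [hc'.2, hv c' hc'.1])]
    have hupd : PySem.Set.update (PySem.Set.add L c) cs = PySem.Set.update L (c :: cs) := rfl
    rw [hupd]
    congr 1
    funext c'
    by_cases hac : c' = c
    · subst hac
      by_cases hmem : c' ∈ cs
      · simp [hmem]
      · simp [hmem]
    · simp [hac]

theorem pvOuter (ws : List String) :
    ∀ (L : List Char) (v : Char → List String), L.Nodup → (∀ c', c' ∉ L → v c' = []) →
    ws.foldl (fun d word => word.toList.foldl (pvStep word) d) (pvState L v)
      = pvState (PySem.Set.update L (ws.flatMap (fun word => word.toList)))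
          (fun c => PySem.Set.update (v c) (ws.filter (fun w => c ∈ w.toList))) := by
  induction ws with
  | nil => intro L v hL hv; simp [PySem.Set.update]
  | cons w ws ih =>
    intro L v hL hv
    rw [List.foldl_cons, pvInner w w.toList L v hL hv,
        ih (PySem.Set.update L w.toList) _
          (PySem.Set.nodup_update L w.toList hL)
          (fun c' hc' => by
            rw [PySem.Set.mem_update] at hc'
            push Not at hc'
            simp [hc'.2, hv c' hc'.1])]
    have hupd : PySem.Set.update (PySem.Set.update L w.toList) (ws.flatMap (fun word => word.toList))
        = PySem.Set.update L ((w :: ws).flatMap (fun word => word.toList)) := by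
      simp [PySem.Set.update, List.foldl_append]
    rw [hupd]
    congr 1
    funext c
    by_cases hcw : c ∈ w.toList
    · simp only [List.filter_cons]
      simp only [hcw, decide_true, if_pos]
      rfl
    · simp only [List.filter_cons]
      simp [hcw]

-- ===== VERDICT (by name: the statement is the Claim_ definition above) =====
theorem get_letter_index_spec : Claim_equal_get_letter_index := by
  intro words _
  unfold Spec_get_letter_index get_letter_index get_letter_index_alt
  have h0 : (PySem.Dict.empty : PySem.Dict String (List String)) = pvState [] (fun _ => []) := rfl
  rw [h0]
  have h1 := pvOuter words [] (fun _ => []) List.nodup_nil (fun _ _ => rfl)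
  show (words.foldl (fun d word => word.toList.foldl (pvStep word) d) (pvState [] (fun _ => []))).items
      = (PySem.Set.ofList (words.flatMap (fun word => word.toList))).map
          (fun l => (String.ofList [l], PySem.Set.ofList (words.filter (fun w => l ∈ w.toList))))
  rw [h1]
  rfl
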